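-- pv_equiv track=rewrite | github.com/Team-Ausdroid-Unimelb/justified-perspective-model-with-prediction | forward_epistemic_model.py | _identifyLastSeenTimestamp
-- ===== SOURCE A (Python) =====
-- import typing
--
-- def _identifyLastSeenTimestamp(observation_list:typing.List,v_index):
--     ts_index_temp = len(observation_list) -1
--
--     # checking whether the variable has been seen by the agent list before
--     while ts_index_temp >=0:
--
--         # state,_ = path[ts_index_temp]
--
--         # checking with observation
--         if v_index in observation_list[ts_index_temp] :
--             return ts_index_temp
--         else:
--             ts_index_temp -= 1
--     return -1
-- ===== SOURCE B (Python) =====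
-- import typing
--
-- def _identifyLastSeenTimestamp(observation_list: typing.List, v_index):
--     result = -1
--     for i, obs in enumerate(observation_list):
--         if v_index in obs:
--             result = i
--     return result
-- ===== Notes on version B (the rewrite author's own statement) =====
-- stated objective: alternative
-- what changed: Replaces A's backward while-loop with early return by a single forward pass over enumerate that keeps the most recent matching index in an accumulator and returns it at the end.
import Mathlib
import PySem

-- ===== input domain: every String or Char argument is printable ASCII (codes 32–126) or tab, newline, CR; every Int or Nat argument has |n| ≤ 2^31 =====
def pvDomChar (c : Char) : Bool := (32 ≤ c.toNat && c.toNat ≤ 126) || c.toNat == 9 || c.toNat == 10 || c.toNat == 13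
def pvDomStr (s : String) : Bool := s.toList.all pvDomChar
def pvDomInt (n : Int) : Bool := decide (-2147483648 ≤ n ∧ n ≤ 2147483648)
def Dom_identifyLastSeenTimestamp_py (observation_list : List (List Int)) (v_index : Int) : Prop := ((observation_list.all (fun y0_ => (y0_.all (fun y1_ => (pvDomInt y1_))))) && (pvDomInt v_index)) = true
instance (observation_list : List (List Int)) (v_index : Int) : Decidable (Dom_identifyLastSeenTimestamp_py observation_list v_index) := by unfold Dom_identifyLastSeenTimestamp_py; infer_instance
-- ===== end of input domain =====

-- B replaces A's backward early-return scan with a forward fold over enumerate keeping the last matching index (alternative decomposition; return value only).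
-- ===== PORT A =====
-- A's while-loop scanning from ts_index_temp = len-1 down to 0; counter k means ts_index_temp = k-1.
def pvALoop (observation_list : List (List Int)) (v_index : Int) : Nat → Int
  | 0 => -1
  | k+1 => if v_index ∈ observation_list.getD k [] then (k : Int) else pvALoop observation_list v_index k

def identifyLastSeenTimestamp_py (observation_list : List (List Int)) (v_index : Int) : Int :=
  pvALoop observation_list v_index observation_list.length

-- ===== PORT B =====
def identifyLastSeenTimestamp_py_alt (observation_list : List (List Int)) (v_index : Int) : Int :=
  (PySem.List.enumerate observation_list).foldl
    (fun result p => if v_index ∈ p.2 then p.1 else result) (-1)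

-- ===== PRECONDITION & SPEC =====
def Spec_identifyLastSeenTimestamp_py (observation_list : List (List Int)) (v_index : Int) (out : Int) : Prop := out = identifyLastSeenTimestamp_py_alt observation_list v_index
instance (observation_list : List (List Int)) (v_index : Int) (out : Int) : Decidable (Spec_identifyLastSeenTimestamp_py observation_list v_index out) := by unfold Spec_identifyLastSeenTimestamp_py; infer_instance

-- ===== CLAIM (what is proved, stated in full; the proofs are below) =====
def Claim_equal_identifyLastSeenTimestamp_py : Prop := ∀ (observation_list : List (List Int)) (v_index : Int), Dom_identifyLastSeenTimestamp_py observation_list v_index → Spec_identifyLastSeenTimestamp_py observation_list v_index (identifyLastSeenTimestamp_py observation_list v_index)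

-- ===== LEMMAS AND PROOFS =====
-- A's loop only looks at indices < k, so a trailing element is invisible to it.
theorem pvALoop_append (obs : List (List Int)) (x : List Int) (v : Int) :
    ∀ k, k ≤ obs.length → pvALoop (obs ++ [x]) v k = pvALoop obs v k := by
  intro k
  induction k with
  | zero => intro _; rfl
  | succ k ih =>
    intro hk
    have hk' : k < obs.length := by omega
    have hg : (obs ++ [x])[k]? = obs[k]? := List.getElem?_append_left hk'
    simp [pvALoop, List.getD, hg, ih (by omega)]

theorem pvMain (v : Int) (obs : List (List Int)) :
    pvALoop obs v obs.length =
      (PySem.List.enumerate obs).foldl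
        (fun result p => if v ∈ p.2 then p.1 else result) (-1) := by
  induction obs using List.reverseRecOn with
  | nil => rfl
  | append_singleton obs x ih =>
    have hlen : (obs ++ [x]).length = obs.length + 1 := by simp
    rw [hlen]
    have hg : (obs ++ [x]).getD obs.length [] = x := by
      simp [List.getD]
    rw [PySem.List.enumerate_append]
    simp only [pvALoop, hg, List.foldl_append,
      pvALoop_append obs x v obs.length le_rfl, ih,
      PySem.List.enumerate, List.foldl_cons, List.foldl_nil]
    simp

-- ===== VERDICT (by name: the statement is the Claim_ definition above) =====
theorem identifyLastSeenTimestamp_py_spec : Claim_equal_identifyLastSeenTimestamp_py := by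
  intro obs v _
  unfold Spec_identifyLastSeenTimestamp_py identifyLastSeenTimestamp_py identifyLastSeenTimestamp_py_alt
  exact pvMain v obs
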